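-- pv_equiv track=rewrite | github.com/yymmaa0000/LeetCode | 527. Word Abbreviation.py | wordsAbbreviation
-- ===== SOURCE A (Python) =====
-- from typing import List
--
-- class Trie:
--     def __init__ (self,val):
--         self.val = val
--         self.next = {}
--
-- def wordsAbbreviation(dict: List[str]) -> List[str]:
--     forest = {}
--
--     for word in dict:
--         if len(word)<4: continue
--         encode = word[0]+str(len(word))+word[-1]
--         if encode not in forest: forest[encode] = Trie(0)
--         current = forest[encode]
--         for x in word:
--             if x not in current.next:
--                 current.next[x] = Trie(1)
--             else:
--                 current.next[x].val += 1
--             current = current.next[x]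
--
--     result = []
--     for word in dict:
--         if len(word)<4:
--             result.append(word)
--             continue
--         encode = word[0]+str(len(word))+word[-1]
--         current = forest[encode]
--         for i,x in enumerate(word):
--             if i >= len(word)-3:
--                 result.append(word)
--                 break
--             current = current.next[x]
--             if current.val == 1:
--                 temp = word[:i+1]+str(len(word)-2-i)+word[-1]
--                 result.append(temp)
--                 break
--     return result
-- ===== SOURCE B (Python) =====
-- from typing import List
--
-- def wordsAbbreviation(dict: List[str]) -> List[str]:
--     def lcp(a, b):
--         n = 0
--         while n < len(a) and n < len(b) and a[n] == b[n]:
--             n += 1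
--         return n
--     groups = {}
--     for j, v in enumerate(dict):
--         if len(v) >= 4:
--             groups.setdefault(v[0] + str(len(v)) + v[-1], []).append((j, v))
--     result = []
--     for i, w in enumerate(dict):
--         if len(w) < 4:
--             result.append(w)
--             continue
--         m = 0
--         for j, v in groups[w[0] + str(len(w)) + w[-1]]:
--             if j != i:
--                 m = max(m, lcp(w, v))
--         p = m + 1
--         if p >= len(w) - 2:
--             result.append(w)
--         else:
--             result.append(w[:p] + str(len(w) - 1 - p) + w[-1])
--     return result
-- ===== Notes on version B (the rewrite author's own statement) =====
-- stated objective: alternative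
-- what changed: Replaces A's shared counting trie (a forest of per-signature tries with occurrence counts walked per word) by grouping the indexed words in a dict keyed by the (first char, length, last char) signature and, per word, taking the maximum longest-common-prefix against the other words of its group to decide how much prefix to keep.
import Mathlib
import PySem

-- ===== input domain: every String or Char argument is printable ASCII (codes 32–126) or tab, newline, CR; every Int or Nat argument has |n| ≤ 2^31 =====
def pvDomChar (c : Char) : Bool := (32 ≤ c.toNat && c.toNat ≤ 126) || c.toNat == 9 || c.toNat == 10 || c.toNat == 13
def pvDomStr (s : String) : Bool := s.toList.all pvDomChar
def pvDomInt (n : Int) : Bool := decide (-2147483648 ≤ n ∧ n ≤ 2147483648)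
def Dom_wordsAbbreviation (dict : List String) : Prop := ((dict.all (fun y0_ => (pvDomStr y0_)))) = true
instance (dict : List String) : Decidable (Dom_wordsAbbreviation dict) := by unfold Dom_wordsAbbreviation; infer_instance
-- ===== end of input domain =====

-- B replaces A's shared counting trie by a direct pairwise longest-common-prefix scan inside each
-- (first char, length, last char) signature class; same return value, no trie ('alternative').

-- ===== PORT A =====
-- The Python Trie has a dict 'next'; a nested inductive is not allowed, so the child dict is the
-- explicit association-list type PvTrieMap with Python-dict semantics (first-match lookup,
-- overwrite in place, new keys appended) implemented by pvTmGet?/pvTmSet below.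
mutual
inductive PvTrie where
  | mk : Int → PvTrieMap → PvTrie
inductive PvTrieMap where
  | nil : PvTrieMap
  | cons : Char → PvTrie → PvTrieMap → PvTrieMap
end

def pvTrieVal : PvTrie → Int
  | .mk v _ => v

def pvTrieNext : PvTrie → PvTrieMap
  | .mk _ m => m

-- dict lookup: first match (keys are unique anyway)
def pvTmGet? : PvTrieMap → Char → Option PvTrie
  | .nil, _ => none
  | .cons c t r, x => if c = x then some t else pvTmGet? r x

-- dict store: overwrite in place, append if new
def pvTmSet : PvTrieMap → Char → PvTrie → PvTrieMap
  | .nil, x, t => .cons x t .nil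
  | .cons c t0 r, x, t => if c = x then .cons c t r else .cons c t0 (pvTmSet r x t)

-- encode = word[0] + str(len(word)) + word[-1]; only used for len(word) ≥ 1 (the defaults are unreachable)
def pvEnc (w : String) : String :=
  String.mk (w.toList.headD ' ' :: ((PySem.Int.toStr (w.length : Int)).toList ++ [w.toList.getLastD ' ']))

-- the for-x-in-word insertion loop: 'current.next[x] = Trie(1)' / 'current.next[x].val += 1', then descend
def pvInsertChars : PvTrie → List Char → PvTrie
  | t, [] => t
  | .mk v m, c :: cs =>
    let child : PvTrie :=
      match pvTmGet? m c with
      | none => .mk 1 .nil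
      | some (.mk v' m') => .mk (v' + 1) m'
    .mk v (pvTmSet m c (pvInsertChars child cs))

-- one iteration of A's first loop: skip short words; ensure the root exists; insert the word
-- (Python mutates forest[encode] in place; functionally that is a store of the updated trie)
def pvBuildStep (forest : PySem.Dict String PvTrie) (word : String) : PySem.Dict String PvTrie :=
  if word.length < 4 then forest
  else
    let encode := pvEnc word
    let forest := if forest.contains encode then forest else forest.insert encode (.mk 0 .nil)
    forest.insert encode (pvInsertChars (forest.getD encode (.mk 0 .nil)) word.toList)

def pvBuildForest (dict : List String) : PySem.Dict String PvTrie :=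
  dict.foldl pvBuildStep PySem.Dict.empty

-- A's second loop body: 'for i,x in enumerate(word): …'; cs is the remaining suffix word[i:].
-- The [] case is unreachable (the loop always breaks at i = len-3 at the latest); len ≥ 4 makes
-- the Nat subtractions exact.  word[:i+1] → take, word[-1] → getLastD (word nonempty).
def pvWalk (word : String) (t : PvTrie) : List Char → Nat → String
  | [], _ => word
  | c :: cs, i =>
    if word.length - 3 ≤ i then word
    else
      let t' := (pvTmGet? (pvTrieNext t) c).getD (.mk 0 .nil)  -- present in the trie (word was inserted)
      if pvTrieVal t' = 1 then
        String.mk (word.toList.take (i + 1) ++ (PySem.Int.toStr ((word.length : Int) - 2 - (i : Int))).toList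
                    ++ [word.toList.getLastD ' '])
      else pvWalk word t' cs (i + 1)

def wordsAbbreviation (dict : List String) : List String :=
  let forest := pvBuildForest dict
  dict.foldl (fun result word =>
    if word.length < 4 then result ++ [word]
    else result ++ [pvWalk word ((forest.get? (pvEnc word)).getD (.mk 0 .nil)) word.toList 0]) []

-- ===== PORT B =====
-- longest common prefix of two character lists (Source B's lcp helper)
def pvLcp : List Char → List Char → Nat
  | a :: as_, b :: bs => if a = b then pvLcp as_ bs + 1 else 0
  | _, _ => 0

-- Source B's grouping loop: groups.setdefault(key, []).append((j, v)) is Dict.modify key [] (· ++ [(j, v)]);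
-- the result loop appends one value per word of enumerate(dict): that loop is the map below.
def wordsAbbreviation_alt (dict : List String) : List String :=
  let groups := (PySem.List.enumerate dict).foldl (fun d jv =>
    if 4 ≤ jv.2.length then d.modify (pvEnc jv.2) [] (· ++ [jv]) else d) PySem.Dict.empty
  (PySem.List.enumerate dict).map (fun iw =>
    let i := iw.1
    let w := iw.2
    if w.length < 4 then w
    else
      let m := (groups.getD (pvEnc w) []).foldl (fun m jv =>
        if jv.1 ≠ i then max m (pvLcp w.toList jv.2.toList) else m) 0
      let p := m + 1
      if w.length - 2 ≤ p then w
      else String.mk (w.toList.take p ++ (PySem.Int.toStr ((w.length : Int) - 1 - (p : Int))).toList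
                      ++ [w.toList.getLastD ' ']))

-- ===== PRECONDITION & SPEC =====
def Spec_wordsAbbreviation (dict : List String) (out : List String) : Prop := out = wordsAbbreviation_alt dict
instance (dict : List String) (out : List String) : Decidable (Spec_wordsAbbreviation dict out) := by unfold Spec_wordsAbbreviation; infer_instance

-- ===== CLAIM (what is proved, stated in full; the proofs are below) =====
def Claim_equal_wordsAbbreviation : Prop := ∀ (dict : List String), Dom_wordsAbbreviation dict → Spec_wordsAbbreviation dict (wordsAbbreviation dict)

-- ===== LEMMAS AND PROOFS =====

-- descending a trie along a path
def pvDescend? : PvTrie → List Char → Option PvTrie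
  | t, [] => some t
  | t, c :: cs =>
    match pvTmGet? (pvTrieNext t) c with
    | none => none
    | some t' => pvDescend? t' cs

-- the root of the (possibly absent) group trie
def pvRootGet (f : PySem.Dict String PvTrie) (s : String) : PvTrie :=
  (f.get? s).getD (.mk 0 .nil)

-- group-membership test used by the counting invariant
def pvPred (s : String) (cs : List Char) (v : String) : Bool :=
  decide (4 ≤ v.length) && (pvEnc v == s) && decide (cs <+: v.toList)

-- trie t counts, at every nonempty path cs, C cs occurrences (node absent iff count 0)
def PvInv (t : PvTrie) (C : List Char → Nat) : Prop :=
  ∀ cs : List Char, cs ≠ [] → (pvDescend? t cs).map pvTrieVal = (if 0 < C cs then some ((C cs : Nat) : Int) else none)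

theorem pvTmGet_pvTmSet : ∀ (m : PvTrieMap) (c x : Char) (t : PvTrie),
    pvTmGet? (pvTmSet m c t) x = if c = x then some t else pvTmGet? m x
  | .nil, c, x, t => by by_cases h : c = x <;> simp [pvTmSet, pvTmGet?, h]
  | .cons c0 t0 r, c, x, t => by
    by_cases h0 : c0 = c
    · subst h0
      by_cases h : c0 = x <;> simp [pvTmSet, pvTmGet?, h]
    · by_cases h : c = x
      · subst h; simp [pvTmSet, pvTmGet?, h0, pvTmGet_pvTmSet r]
      · simp [pvTmSet, pvTmGet?, h0, h, pvTmGet_pvTmSet r]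

theorem pvInsertChars_val (t : PvTrie) (l : List Char) : pvTrieVal (pvInsertChars t l) = pvTrieVal t := by
  cases t with
  | mk v m => cases l <;> simp [pvInsertChars, pvTrieVal]

theorem pvInv_insert : ∀ (l : List Char) (t : PvTrie) (C : List Char → Nat), PvInv t C →
    PvInv (pvInsertChars t l) (fun cs => C cs + (if cs <+: l then 1 else 0))
  | [], t, C, h => by
    intro cs hcs
    have hp : ¬ (cs <+: ([] : List Char)) := by
      simpa [List.prefix_nil] using hcs
    simpa [pvInsertChars, hp] using h cs hcs
  | c :: l', t, C, h => by
    cases t with | mk v m =>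
    intro cs hcs
    cases cs with
    | nil => exact absurd rfl hcs
    | cons x p =>
      by_cases hx : c = x
      · subst hx
        show (pvDescend? (.mk v (pvTmSet m c (pvInsertChars _ l'))) (c :: p)).map pvTrieVal = _
        rw [show pvDescend? (.mk v (pvTmSet m c (pvInsertChars (match pvTmGet? m c with
              | none => PvTrie.mk 1 .nil
              | some (.mk v' m') => PvTrie.mk (v' + 1) m') l'))) (c :: p)
            = pvDescend? (pvInsertChars (match pvTmGet? m c with
              | none => PvTrie.mk 1 .nil
              | some (.mk v' m') => PvTrie.mk (v' + 1) m') l') p from by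
          simp [pvDescend?, pvTrieNext, pvTmGet_pvTmSet]]
        cases hg : pvTmGet? m c with
        | none =>
          have hchild : PvInv (PvTrie.mk 1 .nil) (fun _ => 0) := by
            intro q hq
            cases q with
            | nil => exact absurd rfl hq
            | cons y q' => simp [pvDescend?, pvTrieNext, pvTmGet?]
          have ih := pvInv_insert l' _ _ hchild
          cases p with
          | nil =>
            have h0 : C [c] = 0 := by
              have := h [c] (by simp)
              simpa [pvDescend?, pvTrieNext, hg] using this
            simp only [pvDescend?, Option.map_some]
            rw [pvInsertChars_val]
            simp [pvTrieVal, h0, List.cons_prefix_cons]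
          | cons y p' =>
            have := ih (y :: p') (by simp)
            rw [this]
            have h0 : C (c :: y :: p') = 0 := by
              have := h (c :: y :: p') (by simp)
              simpa [pvDescend?, pvTrieNext, hg] using this
            simp [h0, List.cons_prefix_cons]
        | some ch =>
          cases ch with | mk v0 m0 =>
          have hchild : PvInv (PvTrie.mk (v0 + 1) m0) (fun q => C (c :: q)) := by
            intro q hq
            cases q with
            | nil => exact absurd rfl hq
            | cons y q' =>
              have := h (c :: y :: q') (by simp)
              simpa [pvDescend?, pvTrieNext, hg] using this
          have ih := pvInv_insert l' _ _ hchild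
          cases p with
          | nil =>
            have hv0 : v0 = ((C [c] : Nat) : Int) := by
              have := h [c] (by simp)
              simp only [pvDescend?, pvTrieNext, hg, Option.map_some, pvTrieVal] at this
              by_cases hpos : 0 < C [c]
              · rw [if_pos hpos] at this
                simpa using this
              · rw [if_neg hpos] at this
                exact (Option.some_ne_none _ this).elim
            simp only [pvDescend?, Option.map_some]
            rw [pvInsertChars_val]
            simp [pvTrieVal, List.cons_prefix_cons, hv0]
          | cons y p' =>
            have := ih (y :: p') (by simp)
            rw [this]
            simp [List.cons_prefix_cons]
      · show (pvDescend? (.mk v (pvTmSet m c (pvInsertChars _ l'))) (x :: p)).map pvTrieVal = _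
        have hstep : pvDescend? (PvTrie.mk v (pvTmSet m c (pvInsertChars (match pvTmGet? m c with
              | none => PvTrie.mk 1 .nil
              | some (.mk v' m') => PvTrie.mk (v' + 1) m') l'))) (x :: p)
            = pvDescend? (.mk v m) (x :: p) := by
          simp [pvDescend?, pvTrieNext, pvTmGet_pvTmSet, hx]
        rw [hstep]
        have hnp : ¬ ((x :: p) <+: (c :: l')) := by
          simp [List.cons_prefix_cons]
          intro he; exact absurd he.symm hx
        simpa [hnp] using h (x :: p) hcs

theorem pvRootGet_buildStep (f : PySem.Dict String PvTrie) (w : String) (s : String) :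
    pvRootGet (pvBuildStep f w) s =
      if 4 ≤ w.length ∧ s = pvEnc w then pvInsertChars (pvRootGet f s) w.toList else pvRootGet f s := by
  by_cases hlen : w.length < 4
  · have hno : ¬ (4 ≤ w.length ∧ s = pvEnc w) := by
      intro hh; exact absurd hh.1 (by omega)
    simp [pvBuildStep, hlen, hno]
  · have h4 : 4 ≤ w.length := by omega
    have hroot : ((if f.contains (pvEnc w) then f else f.insert (pvEnc w) (.mk 0 .nil)).getD (pvEnc w)
        (PvTrie.mk 0 .nil)) = pvRootGet f (pvEnc w) := by
      by_cases hc : f.contains (pvEnc w)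
      · simp [hc, pvRootGet, PySem.Dict.getD_eq_get?_getD]
      · rw [if_neg hc, PySem.Dict.getD_insert_self]
        have : f.get? (pvEnc w) = none := by
          rw [PySem.Dict.get?_eq_none_iff_contains]
          simpa using hc
        simp [pvRootGet, this]
    by_cases hs : s = pvEnc w
    · subst hs
      rw [if_pos ⟨h4, rfl⟩]
      simp only [pvBuildStep, if_neg hlen]
      rw [pvRootGet, PySem.Dict.get?_insert]
      simp [hroot]
    · rw [if_neg (by tauto)]
      simp only [pvBuildStep, if_neg hlen]
      rw [pvRootGet, PySem.Dict.get?_insert, if_neg hs]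
      by_cases hc : f.contains (pvEnc w)
      · simp [hc, pvRootGet]
      · rw [if_neg hc, PySem.Dict.get?_insert_of_ne _ _ hs]
        rfl

theorem pvForest_inv : ∀ (l : List String) (f : PySem.Dict String PvTrie) (C : String → List Char → Nat),
    (∀ s, PvInv (pvRootGet f s) (C s)) →
    ∀ s, PvInv (pvRootGet (l.foldl pvBuildStep f) s) (fun cs => C s cs + l.countP (pvPred s cs))
  | [], f, C, h => by
    intro s cs hcs
    simpa using h s cs hcs
  | w :: l', f, C, h => by
    have hstep : ∀ s, PvInv (pvRootGet (pvBuildStep f w) s)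
        (fun cs => C s cs + (if pvPred s cs w then 1 else 0)) := by
      intro s
      rw [pvRootGet_buildStep]
      by_cases hc : 4 ≤ w.length ∧ s = pvEnc w
      · rw [if_pos hc]
        intro cs hcs
        have := pvInv_insert w.toList _ _ (h s) cs hcs
        have hpred : pvPred s cs w = decide (cs <+: w.toList) := by
          simp [pvPred, hc.1, hc.2]
        rw [this]
        by_cases hpre : cs <+: w.toList <;> simp [hpred, hpre]
      · rw [if_neg hc]
        intro cs hcs
        have hpred : pvPred s cs w = false := by
          simp only [pvPred]
          rcases not_and_or.mp hc with h1 | h2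
          · simp [h1]
          · have : (pvEnc w == s) = false := by
              simp; intro he; exact h2 he.symm
            simp [this]
        simpa [hpred] using h s cs hcs
    intro s cs hcs
    have := pvForest_inv l' (pvBuildStep f w) _ hstep s cs hcs
    simp only [List.foldl_cons]
    rw [this]
    have hcnt : C s cs + (if pvPred s cs w then 1 else 0) + l'.countP (pvPred s cs)
        = C s cs + (w :: l').countP (pvPred s cs) := by
      cases hp : pvPred s cs w
      · simp [hp]
      · simp [hp]; omega
    simp only []
    rw [hcnt]

theorem pvBuildForest_inv (dict : List String) (s : String) :
    PvInv (pvRootGet (pvBuildForest dict) s) (fun cs => dict.countP (pvPred s cs)) := by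
  have hempty : ∀ s, PvInv (pvRootGet PySem.Dict.empty s) (fun _ => 0) := by
    intro s cs hcs
    cases cs with
    | nil => exact absurd rfl hcs
    | cons x p => simp [pvRootGet, PySem.Dict.get?_empty, pvDescend?, pvTrieNext, pvTmGet?]
  intro cs hcs
  simpa using pvForest_inv dict PySem.Dict.empty _ hempty s cs hcs

-- B's inner fold (the max-lcp accumulator), with i the index of the current word
def pvM (dict : List String) (i : Int) (w : String) : Nat :=
  (PySem.List.enumerate dict).foldl (fun m jv =>
    if jv.1 ≠ i ∧ 4 ≤ jv.2.length ∧ pvEnc jv.2 = pvEnc w then max m (pvLcp w.toList jv.2.toList)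
    else m) 0

-- number of occurrences in dict of words in w's signature group carrying w's d-prefix
def pvCnt (dict : List String) (w : String) (d : Nat) : Nat :=
  dict.countP (pvPred (pvEnc w) (w.toList.take d))

theorem pvLcp_bridge : ∀ (d : Nat) (a b : List Char), d ≤ a.length →
    ((a.take d <+: b) ↔ d ≤ pvLcp a b)
  | 0, a, b, _ => by simp
  | d + 1, [], b, h => by simp at h
  | d + 1, x :: a', [], h => by simp [pvLcp]
  | d + 1, x :: a', y :: b', h => by
    by_cases hxy : x = y
    · subst hxy
      have ihb := pvLcp_bridge d a' b' (by simpa using h)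
      simp only [List.take_succ_cons, List.cons_prefix_cons, pvLcp, true_and, ihb, if_true]
      omega
    · simp [List.take_succ_cons, List.cons_prefix_cons, pvLcp, hxy]

theorem pvDescend?_append : ∀ (p : List Char) (t : PvTrie) (c : Char),
    pvDescend? t (p ++ [c]) = (pvDescend? t p).bind (fun u => pvTmGet? (pvTrieNext u) c)
  | [], t, c => by
    simp only [List.nil_append, pvDescend?, Option.bind_some]
    cases pvTmGet? (pvTrieNext t) c <;> rfl
  | x :: p', t, c => by
    simp only [List.cons_append, pvDescend?]
    cases pvTmGet? (pvTrieNext t) x with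
    | none => rfl
    | some t' => exact pvDescend?_append p' t' c

theorem pvCountP_enumerate {α : Type} : ∀ (xs : List α) (s : Int) (q : α → Bool),
    (PySem.List.enumerate xs s).countP (fun e => q e.2) = xs.countP q
  | [], s, q => by simp [PySem.List.enumerate_nil]
  | x :: xs', s, q => by
    rw [PySem.List.enumerate_cons]
    simp only [List.countP_cons, pvCountP_enumerate xs' (s + 1) q]

theorem pvCountP_ne_lt {α : Type} : ∀ (xs : List α) (s : Int) (j : Int) (q : α → Bool), j < s →
    (PySem.List.enumerate xs s).countP (fun e => decide (e.1 ≠ j) && q e.2)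
      = (PySem.List.enumerate xs s).countP (fun e => q e.2)
  | [], s, j, q, h => by simp [PySem.List.enumerate_nil]
  | x :: xs', s, j, q, h => by
    rw [PySem.List.enumerate_cons]
    simp only [List.countP_cons, pvCountP_ne_lt xs' (s + 1) j q (by omega)]
    have : (decide (s ≠ j)) = true := by simp; omega
    simp [this]

theorem pvCountP_split {α : Type} : ∀ (xs : List α) (s : Int) (k : Nat) (q : α → Bool)
    (hk : k < xs.length), q xs[k] = true →
    (PySem.List.enumerate xs s).countP (fun e => q e.2)
      = 1 + (PySem.List.enumerate xs s).countP (fun e => decide (e.1 ≠ s + (k : Int)) && q e.2)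
  | [], s, k, q, hk, hq => by simp at hk
  | x :: xs', s, 0, q, hk, hq => by
    rw [PySem.List.enumerate_cons]
    simp only [List.countP_cons]
    have hx : q x = true := by simpa using hq
    have hne : (decide (s ≠ s + ((0 : Nat) : Int))) = false := by simp
    rw [pvCountP_ne_lt xs' (s + 1) (s + ((0 : Nat) : Int)) q (by omega)]
    simp [hx]
    omega
  | x :: xs', s, k + 1, q, hk, hq => by
    rw [PySem.List.enumerate_cons]
    simp only [List.countP_cons]
    have hke : s + ((k + 1 : Nat) : Int) = (s + 1) + (k : Int) := by push_cast; ring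
    have hne : (decide (s ≠ (s + 1) + ((k : Nat) : Int))) = true := by simp; omega
    rw [hke, pvCountP_split xs' (s + 1) k q (by simpa using hk) (by simpa using hq)]
    simp [hne]
    omega

theorem pvFoldMax_lt {β : Type} (Q : β → Prop) [DecidablePred Q] (g : β → Nat) (d : Nat) :
    ∀ (l : List β) (acc : Nat),
    (l.foldl (fun m x => if Q x then max m (g x) else m) acc < d ↔
      (acc < d ∧ ∀ x ∈ l, Q x → g x < d))
  | [], acc => by simp
  | x :: l', acc => by
    simp only [List.foldl_cons, pvFoldMax_lt Q g d l', List.mem_cons]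
    by_cases hq : Q x
    · simp only [if_pos hq]
      constructor
      · rintro ⟨hm, hall⟩
        exact ⟨by omega, fun y hy hqy => by
          rcases hy with rfl | hy
          · omega
          · exact hall y hy hqy⟩
      · rintro ⟨hacc, hall⟩
        exact ⟨by have := hall x (Or.inl rfl) hq; omega, fun y hy => hall y (Or.inr hy)⟩
    · simp only [if_neg hq]
      constructor
      · rintro ⟨hm, hall⟩
        exact ⟨hm, fun y hy hqy => by
          rcases hy with rfl | hy
          · exact absurd hqy hq
          · exact hall y hy hqy⟩
      · rintro ⟨hacc, hall⟩
        exact ⟨hacc, fun y hy => hall y (Or.inr hy)⟩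

-- the central count: for 1 ≤ d ≤ len w, the group count of w's d-prefix is 1 + (# others with lcp ≥ d)
theorem pvCnt_eq (dict : List String) (k : Nat) (hk : k < dict.length) (h4 : 4 ≤ dict[k].length)
    (d : Nat) (h1 : 1 ≤ d) (hd : d ≤ dict[k].length) :
    (pvCnt dict dict[k] d = 1 ↔ pvM dict (k : Int) dict[k] < d) := by
  have hq : pvPred (pvEnc dict[k]) (dict[k].toList.take d) dict[k] = true := by
    simp [pvPred, h4, List.take_prefix]
  have hbridge : ∀ v : String, ((dict[k].toList.take d <+: v.toList) ↔ d ≤ pvLcp dict[k].toList v.toList) :=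
    fun v => pvLcp_bridge d _ _ (by rw [String.length_toList]; exact hd)
  rw [pvCnt, ← pvCountP_enumerate dict 0 (pvPred (pvEnc dict[k]) (dict[k].toList.take d)),
    pvCountP_split dict 0 k _ hk hq]
  constructor
  · intro h
    have hz : (PySem.List.enumerate dict 0).countP
        (fun e => decide (e.1 ≠ 0 + (k : Int)) && pvPred (pvEnc dict[k]) (dict[k].toList.take d) e.2) = 0 := by
      omega
    rw [List.countP_eq_zero] at hz
    rw [pvM, pvFoldMax_lt]
    refine ⟨h1, fun jv hjv hQ => ?_⟩
    by_contra hge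
    rw [not_lt] at hge
    refine hz jv hjv ?_
    have hpre : dict[k].toList.take d <+: jv.2.toList := (hbridge jv.2).mpr hge
    have hne : jv.1 ≠ 0 + (k : Int) := by simpa using hQ.1
    simp [pvPred, hQ.2.1, hQ.2.2, hpre]
    omega
  · intro hm
    rw [pvM, pvFoldMax_lt] at hm
    have hz : (PySem.List.enumerate dict 0).countP
        (fun e => decide (e.1 ≠ 0 + (k : Int)) && pvPred (pvEnc dict[k]) (dict[k].toList.take d) e.2) = 0 := by
      rw [List.countP_eq_zero]
      intro e he hcond
      simp only [pvPred, Bool.and_eq_true, decide_eq_true_eq, beq_iff_eq] at hcond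
      obtain ⟨hne, ⟨h4e, henc⟩, hpre⟩ := hcond
      have hlt := hm.2 e he ⟨by simpa using hne, h4e, henc⟩
      exact absurd ((hbridge e.2).mp hpre) (by omega)
    omega

theorem pvCnt_pos (dict : List String) (k : Nat) (hk : k < dict.length) (h4 : 4 ≤ dict[k].length)
    (d : Nat) : 0 < pvCnt dict dict[k] d := by
  rw [pvCnt, List.countP_pos_iff]
  exact ⟨dict[k], List.getElem_mem hk, by simp [pvPred, h4, List.take_prefix]⟩

-- the walk of A's second loop, characterised by m = pvM …
theorem pvWalk_eq (dict : List String) (k : Nat) (hk : k < dict.length) (h4 : 4 ≤ dict[k].length) :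
    ∀ (cs : List Char) (i : Nat) (t : PvTrie), cs = dict[k].toList.drop i →
    i ≤ pvM dict (k : Int) dict[k] → i ≤ dict[k].length - 3 →
    pvDescend? (pvRootGet (pvBuildForest dict) (pvEnc dict[k])) (dict[k].toList.take i) = some t →
    pvWalk dict[k] t cs i =
      (if dict[k].length - 3 ≤ pvM dict (k : Int) dict[k] then dict[k]
       else String.mk (dict[k].toList.take (pvM dict (k : Int) dict[k] + 1)
          ++ (PySem.Int.toStr ((dict[k].length : Int) - 2 - (pvM dict (k : Int) dict[k] : Int))).toList
          ++ [dict[k].toList.getLastD ' ']))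
  | [], i, t, hdrop, him, hi3, hdesc => by
    exfalso
    have := List.drop_eq_nil_iff.mp hdrop.symm
    rw [String.length_toList] at this
    omega
  | c :: cs', i, t, hdrop, him, hi3, hdesc => by
    have hiL : i < dict[k].toList.length := by
      by_contra hge
      rw [List.drop_eq_nil_of_le (by omega)] at hdrop
      exact List.cons_ne_nil _ _ hdrop
    have hiL' : i < dict[k].length := by rwa [String.length_toList] at hiL
    have hc1 : c = dict[k].toList[i] := by
      rw [List.drop_eq_getElem_cons hiL] at hdrop
      injection hdrop.symm with h1 h2
      exact h1.symm
    have hc2 : cs' = dict[k].toList.drop (i + 1) := by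
      rw [List.drop_eq_getElem_cons hiL] at hdrop
      injection hdrop.symm with h1 h2
      exact h2.symm
    simp only [pvWalk]
    by_cases hstop : dict[k].length - 3 ≤ i
    · rw [if_pos hstop, if_pos (by omega)]
    · rw [if_neg hstop]
      have htake : dict[k].toList.take (i + 1) = dict[k].toList.take i ++ [dict[k].toList[i]] :=
        List.take_succ_eq_append_getElem hiL
      have hne0 : dict[k].toList ≠ [] := by
        intro hnil
        rw [hnil] at hiL
        simp at hiL
      have hinv := pvBuildForest_inv dict (pvEnc dict[k]) (dict[k].toList.take (i + 1))
        (by simp [List.take_eq_nil_iff, hne0])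
      rw [htake] at hinv
      rw [pvDescend?_append, hdesc, Option.bind_some] at hinv
      have hpos : 0 < dict.countP (pvPred (pvEnc dict[k]) (dict[k].toList.take (i + 1))) := by
        have := pvCnt_pos dict k hk h4 (i + 1)
        simpa [pvCnt] using this
      rw [htake] at hpos
      rw [if_pos hpos] at hinv
      obtain ⟨t'', hget, hval⟩ : ∃ t'', pvTmGet? (pvTrieNext t) dict[k].toList[i] = some t'' ∧
          pvTrieVal t'' = ((dict.countP (pvPred (pvEnc dict[k]) (dict[k].toList.take i ++ [dict[k].toList[i]])) : Nat) : Int) := by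
        cases hg : pvTmGet? (pvTrieNext t) dict[k].toList[i] with
        | none => rw [hg] at hinv; simp at hinv
        | some u => rw [hg] at hinv; exact ⟨u, rfl, by simpa using hinv⟩
      have hval' : pvTrieVal t''
          = ((dict.countP (pvPred (pvEnc dict[k]) (dict[k].toList.take (i + 1))) : Nat) : Int) := by
        rw [htake]
        exact hval
      rw [hc1, hget]
      simp only [Option.getD_some]
      by_cases hone : pvTrieVal t'' = 1
      · rw [if_pos hone]
        have hcnt1 : pvCnt dict dict[k] (i + 1) = 1 := by
          rw [hval'] at hone
          rw [pvCnt]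
          exact_mod_cast hone
        have hmlt := (pvCnt_eq dict k hk h4 (i + 1) (by omega) (by omega)).mp hcnt1
        have hmi : pvM dict (k : Int) dict[k] = i := by omega
        rw [if_neg (by omega), hmi]
      · rw [if_neg hone]
        have hcnt : pvCnt dict dict[k] (i + 1) ≠ 1 := by
          intro hh
          apply hone
          rw [hval']
          rw [pvCnt] at hh
          exact_mod_cast hh
        have hge : i + 1 ≤ pvM dict (k : Int) dict[k] := by
          by_contra hlt
          exact hcnt ((pvCnt_eq dict k hk h4 (i + 1) (by omega) (by omega)).mpr (by omega))
        exact pvWalk_eq dict k hk h4 cs' (i + 1) t'' hc2 hge (by omega)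
          (by rw [htake, pvDescend?_append, hdesc, Option.bind_some]; exact hget)

theorem pvA_foldl (forest : PySem.Dict String PvTrie) :
    ∀ (l : List String) (acc : List String),
    l.foldl (fun result word =>
      if word.length < 4 then result ++ [word]
      else result ++ [pvWalk word ((forest.get? (pvEnc word)).getD (.mk 0 .nil)) word.toList 0]) acc
    = acc ++ l.map (fun word =>
        if word.length < 4 then word
        else pvWalk word ((forest.get? (pvEnc word)).getD (.mk 0 .nil)) word.toList 0)
  | [], acc => by simp
  | w :: l', acc => by
    simp only [List.foldl_cons, List.map_cons]
    by_cases hw : w.length < 4 <;>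
      simp [hw, pvA_foldl forest l']

-- Source B's groups dict, looked up at any key, is the filter of enumerate(dict) by that signature
theorem pvGroups_getD : ∀ (l : List (Int × String)) (d : PySem.Dict String (List (Int × String)))
    (key : String),
    (l.foldl (fun d jv => if 4 ≤ jv.2.length then d.modify (pvEnc jv.2) [] (· ++ [jv]) else d) d).getD key []
      = d.getD key [] ++ l.filter (fun jv => decide (4 ≤ jv.2.length) && (pvEnc jv.2 == key))
  | [], d, key => by simp
  | jv :: l', d, key => by
    simp only [List.foldl_cons, List.filter_cons]
    by_cases h4 : 4 ≤ jv.2.length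
    · rw [if_pos h4]
      rw [pvGroups_getD l' _ key]
      by_cases hkey : pvEnc jv.2 = key
      · rw [hkey, PySem.Dict.getD_modify_self]
        simp [h4]
      · rw [PySem.Dict.getD_modify, if_neg (fun hh => hkey hh.symm)]
        have : (pvEnc jv.2 == key) = false := by simpa using hkey
        simp [h4, this]
    · rw [if_neg h4]
      rw [pvGroups_getD l' d key]
      have : ¬ (4 ≤ jv.2.length) := h4
      simp [this]

theorem pvFoldl_congr {α β : Type} {f g : α → β → α} (h : ∀ a b, f a b = g a b) :
    ∀ (l : List β) (a : α), l.foldl f a = l.foldl g a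
  | [], _ => rfl
  | x :: l', a => by rw [List.foldl_cons, List.foldl_cons, h, pvFoldl_congr h l']

-- B's per-word fold over its group is pvM, the same maximum taken over all of enumerate(dict)
theorem pvM_eq (dict : List String) (i : Int) (w : String) :
    ((((PySem.List.enumerate dict).foldl (fun d jv =>
        if 4 ≤ jv.2.length then d.modify (pvEnc jv.2) [] (· ++ [jv]) else d)
        PySem.Dict.empty).getD (pvEnc w) []).foldl (fun m jv =>
      if jv.1 ≠ i then max m (pvLcp w.toList jv.2.toList) else m) 0)
    = pvM dict i w := by
  rw [pvGroups_getD, PySem.Dict.getD_empty, List.nil_append, List.foldl_filter, pvM]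
  apply pvFoldl_congr
  intro a b
  by_cases hp : (decide (4 ≤ b.2.length) && (pvEnc b.2 == pvEnc w)) = true
  · rw [if_pos hp]
    simp only [Bool.and_eq_true, decide_eq_true_eq, beq_iff_eq] at hp
    by_cases hne : b.1 ≠ i
    · rw [if_pos hne, if_pos ⟨hne, hp.1, hp.2⟩]
    · rw [if_neg hne, if_neg (fun hc => hne hc.1)]
  · rw [if_neg hp]
    rw [if_neg (fun hc => hp (by simp [hc.2.1, hc.2.2]))]

-- ===== VERDICT (by name: the statement is the Claim_ definition above) =====
theorem wordsAbbreviation_spec : Claim_equal_wordsAbbreviation := by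
  intro dict _
  unfold Spec_wordsAbbreviation wordsAbbreviation wordsAbbreviation_alt
  rw [pvA_foldl]
  apply List.ext_getElem
  · simp [PySem.List.length_enumerate]
  · intro n h1 h2
    have hn : n < dict.length := by simpa using h1
    simp only [List.nil_append, List.getElem_map, PySem.List.getElem_enumerate, zero_add]
    rw [pvM_eq dict (n : Int) dict[n]]
    by_cases h4 : dict[n].length < 4
    · rw [if_pos h4, if_pos h4]
    · rw [if_neg h4, if_neg h4]
      rw [show ((pvBuildForest dict).get? (pvEnc dict[n])).getD (PvTrie.mk 0 .nil)
          = pvRootGet (pvBuildForest dict) (pvEnc dict[n]) from rfl]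
      rw [pvWalk_eq dict n hn (by omega) dict[n].toList 0 _ (by simp) (Nat.zero_le _)
        (Nat.zero_le _) (by simp [pvDescend?])]
      by_cases hcnd : dict[n].length - 3 ≤ pvM dict (n : Int) dict[n]
      · rw [if_pos hcnd, if_pos (by omega)]
      · rw [if_neg hcnd, if_neg (by omega)]
        rw [show ((dict[n].length : Int) - 1 - ((pvM dict (n : Int) dict[n] + 1 : Nat) : Int))
            = ((dict[n].length : Int) - 2 - (pvM dict (n : Int) dict[n] : Int)) from by
          push_cast; ring]
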